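-- pv_equiv track=rewrite | github.com/gabriellaec/desoft-analise-exercicios | backup/user_044/ch151_2020_04_13_19_33_41_093347.py | estritamente_decrescente
-- ===== SOURCE A (Python) =====
-- def estritamente_decrescente(lista):
--     ls=[]
--     m=0
--     for i in lista:
--         if len(ls)!=0:
--             m=min(ls)
--         if i>m:
--             ls.append(i)
--     return ls
-- ===== SOURCE B (Python) =====
-- def estritamente_decrescente(lista):
--     # B: locate the first positive element, then filter the remaining
--     # elements of the SAME iterator against that fixed threshold.
--     it = iter(lista)
--     for base in it:
--         if base > 0:
--             return [base] + [x for x in it if x > base]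
--     return []
-- ===== Notes on version B (the rewrite author's own statement) =====
-- stated objective: faster
-- what changed: A recomputes min(ls) inside the loop on every step; B splits the work into a locate phase (first element > 0 becomes the fixed threshold, since the running minimum never changes once set) and a single filter pass over the rest of the iterator.
import Mathlib
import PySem

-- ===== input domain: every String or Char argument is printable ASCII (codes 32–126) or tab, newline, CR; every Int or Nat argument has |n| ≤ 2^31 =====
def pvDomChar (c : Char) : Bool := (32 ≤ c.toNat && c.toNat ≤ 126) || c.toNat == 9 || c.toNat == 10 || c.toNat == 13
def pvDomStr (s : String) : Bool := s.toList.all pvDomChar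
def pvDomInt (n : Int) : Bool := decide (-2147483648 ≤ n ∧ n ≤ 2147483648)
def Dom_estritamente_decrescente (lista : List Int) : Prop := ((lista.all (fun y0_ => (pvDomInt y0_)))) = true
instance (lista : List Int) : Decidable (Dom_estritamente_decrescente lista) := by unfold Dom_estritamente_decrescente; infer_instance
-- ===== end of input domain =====

-- B replaces A's per-step min(ls) recomputation by a locate-then-filter pass (same return value).
-- ===== PORT A =====
-- the for-loop of A, state (ls, m)
def pvALoop (lista : List Int) (ls : List Int) (m : Int) : List Int :=
  match lista with
  | [] => ls
  | i :: rest =>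
    let m' := if ls.length ≠ 0 then (PySem.List.min? ls (fun x => x)).getD m else m
    pvALoop rest (if i > m' then ls ++ [i] else ls) m'

def estritamente_decrescente (lista : List Int) : List Int :=
  pvALoop lista [] 0

-- ===== PORT B =====
def estritamente_decrescente_alt (lista : List Int) : List Int :=
  match lista with
  | [] => []
  | base :: rest =>
    if base > 0 then base :: rest.filter (fun x => x > base)
    else estritamente_decrescente_alt rest

-- ===== PRECONDITION & SPEC =====
def Spec_estritamente_decrescente (lista : List Int) (out : List Int) : Prop := out = estritamente_decrescente_alt lista
instance (lista : List Int) (out : List Int) : Decidable (Spec_estritamente_decrescente lista out) := by unfold Spec_estritamente_decrescente; infer_instance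

-- ===== CLAIM (what is proved, stated in full; the proofs are below) =====
def Claim_equal_estritamente_decrescente : Prop := ∀ (lista : List Int), Dom_estritamente_decrescente lista → Spec_estritamente_decrescente lista (estritamente_decrescente lista)

-- ===== LEMMAS AND PROOFS =====

-- ===== VERDICT (by name: the statement is the Claim_ definition above) =====
-- once ls = base :: tail with every tail element > base, min(ls) = base forever
lemma pvMin_fixed (base : Int) (tail : List Int) (h : ∀ y ∈ tail, base < y) :
    PySem.List.min? (base :: tail) (fun x => x) = some base := by
  rw [PySem.List.min?_id_cons]
  congr 1
  induction tail generalizing base with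
  | nil => rfl
  | cons y t ih =>
    have hy : base < y := h y (by simp)
    simp only [List.foldl_cons]
    rw [min_eq_left hy.le]
    exact ih base (fun z hz => h z (by simp [hz]))

lemma pvALoop_after (rest : List Int) : ∀ (base : Int) (tail : List Int) (m : Int),
    (∀ y ∈ tail, base < y) →
    pvALoop rest (base :: tail) m = (base :: tail) ++ rest.filter (fun x => x > base) := by
  induction rest with
  | nil => intro base tail m _; simp [pvALoop]
  | cons i rest ih =>
    intro base tail m h
    simp only [pvALoop, List.length_cons, pvMin_fixed base tail h, Option.getD_some]
    rw [if_pos (show tail.length + 1 ≠ 0 by omega)]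
    by_cases hi : i > base
    · rw [if_pos hi, List.cons_append,
         ih base (tail ++ [i]) base (by intro y hy; rcases List.mem_append.1 hy with h1 | h1
                                        · exact h y h1
                                        · simp at h1; omega)]
      simp [hi]
    · rw [if_neg hi, ih base tail base h]
      simp [hi]

lemma pvALoop_eq (lista : List Int) :
    pvALoop lista [] 0 = estritamente_decrescente_alt lista := by
  induction lista with
  | nil => rfl
  | cons i rest ih =>
    have step : pvALoop (i :: rest) [] 0 = pvALoop rest (if i > 0 then [i] else []) 0 := by
      simp [pvALoop]
    rw [step]
    by_cases hi : i > 0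
    · rw [if_pos hi]
      rw [pvALoop_after rest i [] 0 (by simp)]
      simp [estritamente_decrescente_alt, hi]
    · rw [if_neg hi, ih]
      simp [estritamente_decrescente_alt, hi]

theorem estritamente_decrescente_spec : Claim_equal_estritamente_decrescente := by
  intro lista _
  unfold Spec_estritamente_decrescente estritamente_decrescente
  exact pvALoop_eq lista
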